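-- pv_equiv track=rewrite | github.com/broCapang/CTF | mcc_speedhack/crackme/test.py | reverse_flag
-- ===== SOURCE A (Python) =====
-- def reverse_flag(len):
--     # Initialize the flag array with the given hex values
--     flag = [0x76, 0x31, 0x49, 0x1e, 0x71, 0x1f, 0x40, 0x53, 0x24, 0x7b, 0x18, 0x34, 0x75, 0x35, 0x6b, 0x15, 0x3c, 0x7b, 0x7c, 0x1d, 0x32]
--
--     for i in range(len):
--         for c in range(256,0,-1):  # Loop through all possible byte values (0 to 255)
--             flag[i] = c
--             flag[i] ^= flag[i] >> 1
--             flag[i] ^= flag[i] >> 2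
--             flag[i] ^= flag[i] >> 3
--             flag[i] ^= flag[i] >> 4
--
--             if i > 0:
--                 flag[i] ^= flag[i - 1]
--
--             # Apply the mask to each element individually
--             flag[i] &= 0xFF  # Ensure we only keep the lower 8 bits
--
--     # Convert flag values to ASCII characters
--     return flag
-- ===== SOURCE B (Python) =====
-- def reverse_flag(len):
--     # Same initial hex values as A
--     flag = [0x76, 0x31, 0x49, 0x1e, 0x71, 0x1f, 0x40, 0x53, 0x24, 0x7b, 0x18, 0x34, 0x75, 0x35, 0x6b, 0x15, 0x3c, 0x7b, 0x7c, 0x1d, 0x32]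
--     # The inner 256-value loop of A is dead except its last iteration c=1,
--     # whose shift/xor cascade maps 1 to 1; so each entry is just 1 xor the
--     # previous (already rewritten) entry.
--     prev = 0
--     for i in range(len):
--         flag[i] = 1 ^ prev
--         prev = flag[i]
--     return flag
-- ===== Notes on version B (the rewrite author's own statement) =====
-- stated objective: simpler
-- what changed: Replaced the nested 256-iteration inner loop (dead except its last iteration c=1, whose shift/xor cascade fixes 1) by a single pass keeping the previous rewritten byte and assigning 1 ^ prev in place.
import Mathlib
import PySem

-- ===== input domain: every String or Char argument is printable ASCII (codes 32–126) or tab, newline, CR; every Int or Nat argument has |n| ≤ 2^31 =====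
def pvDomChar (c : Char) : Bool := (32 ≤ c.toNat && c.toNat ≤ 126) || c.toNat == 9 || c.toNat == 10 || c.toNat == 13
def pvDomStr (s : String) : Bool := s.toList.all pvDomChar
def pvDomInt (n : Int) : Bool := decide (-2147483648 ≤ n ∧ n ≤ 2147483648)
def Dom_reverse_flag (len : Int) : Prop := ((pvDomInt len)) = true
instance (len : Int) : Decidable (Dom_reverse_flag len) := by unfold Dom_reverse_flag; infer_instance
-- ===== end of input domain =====

-- B collapses A's dead 256-iteration inner loop into one in-place pass keeping the previous byte: simpler, same values.

-- ===== PORT A =====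
-- the body of A's inner c-loop (flag[i]=c; the xor/shift cascade; the i>0 xor; the & 0xFF)
def pvInnerA (i : Int) (flag : List Int) (c : Int) : List Int :=
  let flag := PySem.List.pySetD flag i c
  let flag := PySem.List.pySetD flag i (PySem.Int.bxor (PySem.List.pyGetD flag i 0) ((PySem.List.pyGetD flag i 0) >>> 1))
  let flag := PySem.List.pySetD flag i (PySem.Int.bxor (PySem.List.pyGetD flag i 0) ((PySem.List.pyGetD flag i 0) >>> 2))
  let flag := PySem.List.pySetD flag i (PySem.Int.bxor (PySem.List.pyGetD flag i 0) ((PySem.List.pyGetD flag i 0) >>> 3))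
  let flag := PySem.List.pySetD flag i (PySem.Int.bxor (PySem.List.pyGetD flag i 0) ((PySem.List.pyGetD flag i 0) >>> 4))
  let flag := if i > 0 then
      PySem.List.pySetD flag i (PySem.Int.bxor (PySem.List.pyGetD flag i 0) (PySem.List.pyGetD flag (i - 1) 0))
    else flag
  PySem.List.pySetD flag i (PySem.Int.band (PySem.List.pyGetD flag i 0) 0xFF)

def reverse_flag (len : Int) : List Int :=
  let flag : List Int := [0x76, 0x31, 0x49, 0x1e, 0x71, 0x1f, 0x40, 0x53, 0x24, 0x7b, 0x18, 0x34, 0x75, 0x35, 0x6b, 0x15, 0x3c, 0x7b, 0x7c, 0x1d, 0x32]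
  (PySem.List.pyRange 0 len 1).foldl (fun flag i =>
    (PySem.List.pyRange 256 0 (-1)).foldl (pvInnerA i) flag) flag

-- ===== PORT B =====
-- B's loop body: flag[i] = 1 ^ prev; prev = flag[i]
def pvStepB (s : List Int × Int) (i : Int) : List Int × Int :=
  let v := PySem.Int.bxor 1 s.2
  (PySem.List.pySetD s.1 i v, v)

def reverse_flag_alt (len : Int) : List Int :=
  let flag : List Int := [0x76, 0x31, 0x49, 0x1e, 0x71, 0x1f, 0x40, 0x53, 0x24, 0x7b, 0x18, 0x34, 0x75, 0x35, 0x6b, 0x15, 0x3c, 0x7b, 0x7c, 0x1d, 0x32]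
  ((PySem.List.pyRange 0 len 1).foldl pvStepB (flag, 0)).1

-- ===== PRECONDITION & SPEC =====
-- Pre_ excludes exactly len > 21, where the Python A raises IndexError (B raises there too).
def Pre_reverse_flag (len : Int) : Prop := len ≤ 21
instance (len : Int) : Decidable (Pre_reverse_flag len) := by unfold Pre_reverse_flag; infer_instance
def pvWitness_reverse_flag : Int := 21

def Spec_reverse_flag (len : Int) (out : List Int) : Prop := out = reverse_flag_alt len
instance (len : Int) (out : List Int) : Decidable (Spec_reverse_flag len out) := by unfold Spec_reverse_flag; infer_instance

-- ===== CLAIM (what is proved, stated in full; the proofs are below) =====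
def Claim_equal_reverse_flag : Prop := ∀ (len : Int), Dom_reverse_flag len → Pre_reverse_flag len → Spec_reverse_flag len (reverse_flag len)

-- ===== LEMMAS AND PROOFS =====

-- the initial list (proof-side abbreviation; defeq to the literals in both ports)
def pvF0 : List Int := [0x76, 0x31, 0x49, 0x1e, 0x71, 0x1f, 0x40, 0x53, 0x24, 0x7b, 0x18, 0x34, 0x75, 0x35, 0x6b, 0x15, 0x3c, 0x7b, 0x7c, 0x1d, 0x32]

-- the xor/shift cascade of A's inner body, as a function of the written byte c
def pvG (c : Int) : Int :=
  let v := PySem.Int.bxor c (c >>> 1)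
  let v := PySem.Int.bxor v (v >>> 2)
  let v := PySem.Int.bxor v (v >>> 3)
  PySem.Int.bxor v (v >>> 4)

-- closed form of the inner body: it writes index i only
theorem pv_closed_succ (m : Nat) (flag : List Int) (c : Int) (h : flag.length = 21) (hn : m + 1 < 21) :
    pvInnerA (↑(m + 1)) flag c
      = flag.set (m + 1) (PySem.Int.band (PySem.Int.bxor (pvG c) (flag[m]?.getD 0)) 255) := by
  have hc : ((m + 1 : Nat) : Int) - 1 = (m : Int) := by push_cast; ring
  have hne : m + 1 ≠ m := Nat.succ_ne_self m
  have hpos : ((m + 1 : Nat) : Int) > 0 := by positivity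
  simp only [pvInnerA, pvG, hpos, if_true, hc, PySem.List.pySetD_natCast,
    PySem.List.pyGetD_natCast, List.getD_eq_getElem?_getD, List.set_set,
    List.getElem?_set_eq_of_lt, List.getElem?_set_ne hne, Option.getD_some, h, hn]

theorem pv_closed_zero (flag : List Int) (c : Int) (h : flag.length = 21) :
    pvInnerA 0 flag c = flag.set 0 (PySem.Int.band (pvG c) 255) := by
  have hz : (0 : Nat) < 21 := by norm_num
  simp only [pvInnerA, pvG, PySem.List.pySetD_of_nonneg, le_refl, Int.toNat_zero,
    PySem.List.pyGetD_zero, List.getD_eq_getElem?_getD, List.set_set,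
    List.getElem?_set_eq_of_lt, Option.getD_some, h, hz, lt_irrefl, if_false]

theorem pv_inner_len (n : Nat) (flag : List Int) (c : Int) (h : flag.length = 21) (hn : n < 21) :
    (pvInnerA (↑n) flag c).length = 21 := by
  cases n with
  | zero => rw [Nat.cast_zero, pv_closed_zero flag c h]; simp [h]
  | succ m => rw [pv_closed_succ m flag c h hn]; simp [h]

theorem pv_inner_absorb (n : Nat) (flag : List Int) (c c' : Int) (h : flag.length = 21) (hn : n < 21) :
    pvInnerA (↑n) (pvInnerA (↑n) flag c') c = pvInnerA (↑n) flag c := by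
  have h' := pv_inner_len n flag c' h hn
  cases n with
  | zero =>
      rw [Nat.cast_zero, pv_closed_zero flag c' h, pv_closed_zero _ c (by simp [h]),
        pv_closed_zero flag c h, List.set_set]
  | succ m =>
      rw [pv_closed_succ m flag c' h hn, pv_closed_succ m _ c (by simp [h]) hn,
        pv_closed_succ m flag c h hn,
        List.getElem?_set_ne (Nat.succ_ne_self m), List.set_set]

-- a run of the inner body ending in d equals its last iteration alone
theorem pv_foldl_lastD (n : Nat) (hn : n < 21) : ∀ (l : List Int) (d : Int) (flag : List Int),
    flag.length = 21 → (l ++ [d]).foldl (pvInnerA (↑n)) flag = pvInnerA (↑n) flag d := by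
  intro l
  induction l with
  | nil => intro d flag _; rfl
  | cons c l ih =>
      intro d flag h
      show (l ++ [d]).foldl (pvInnerA (↑n)) (pvInnerA (↑n) flag c) = _
      rw [ih d _ (pv_inner_len n flag c h hn), pv_inner_absorb n flag d c h hn]

theorem pv_range_decomp :
    PySem.List.pyRange 256 0 (-1) = (PySem.List.pyRange (1 + 1) (256 + 1) 1).reverse ++ [(1 : Int)] := by
  rw [PySem.List.pyRange_neg_one_eq_reverse]
  have h0 : (0 : Int) + 1 = 1 := by norm_num
  rw [h0, PySem.List.pyRange_one_cons (by norm_num), List.reverse_cons]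

theorem pv_inner_eq (n : Nat) (flag : List Int) (h : flag.length = 21) (hn : n < 21) :
    (PySem.List.pyRange 256 0 (-1)).foldl (pvInnerA (↑n)) flag = pvInnerA (↑n) flag 1 := by
  rw [pv_range_decomp, pv_foldl_lastD n hn _ 1 flag h]

-- main invariant of the outer loop: A's fold equals the list of B's fold; B keeps
-- length 21, prev ∈ {0,1}, and prev = the last written byte
theorem pv_main : ∀ (n : Nat), n ≤ 21 →
    ((PySem.List.pyRange 0 (↑n) 1).foldl (fun flag i =>
        (PySem.List.pyRange 256 0 (-1)).foldl (pvInnerA i) flag) pvF0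
      = ((PySem.List.pyRange 0 (↑n) 1).foldl pvStepB (pvF0, 0)).1)
    ∧ ((PySem.List.pyRange 0 (↑n) 1).foldl pvStepB (pvF0, 0)).1.length = 21
    ∧ (((PySem.List.pyRange 0 (↑n) 1).foldl pvStepB (pvF0, 0)).2 = 0
        ∨ ((PySem.List.pyRange 0 (↑n) 1).foldl pvStepB (pvF0, 0)).2 = 1)
    ∧ (∀ m : Nat, n = m + 1 → ((PySem.List.pyRange 0 (↑n) 1).foldl pvStepB (pvF0, 0)).2
        = ((PySem.List.pyRange 0 (↑n) 1).foldl pvStepB (pvF0, 0)).1[m]?.getD 0) := by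
  intro n
  induction n with
  | zero =>
      intro _
      refine ⟨rfl, by decide, Or.inl rfl, ?_⟩
      intro m hm; omega
  | succ m ih =>
      intro hle
      obtain ⟨hAB, hlen, hprev01, hprevget⟩ := ih (by omega)
      have hm21 : m + 1 < 21 ∨ m + 1 = 21 := by omega
      have hm21' : m < 21 := by omega
      have hsplit : PySem.List.pyRange 0 (↑(m + 1) : Int) 1
          = PySem.List.pyRange 0 (↑m) 1 ++ [(↑m : Int)] := by
        have hc : ((m + 1 : Nat) : Int) = (↑m : Int) + 1 := by push_cast; ring
        rw [hc]
        exact PySem.List.pyRange_one_succ_right (by positivity)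
      rw [hsplit]
      simp only [List.foldl_append, List.foldl_cons, List.foldl_nil]
      rw [hAB]
      rw [pv_inner_eq m _ hlen hm21']
      have hstep : pvStepB ((PySem.List.pyRange 0 (↑m : Int) 1).foldl pvStepB (pvF0, 0)) (↑m)
          = (((PySem.List.pyRange 0 (↑m : Int) 1).foldl pvStepB (pvF0, 0)).1.set m
              (PySem.Int.bxor 1 ((PySem.List.pyRange 0 (↑m : Int) 1).foldl pvStepB (pvF0, 0)).2),
             PySem.Int.bxor 1 ((PySem.List.pyRange 0 (↑m : Int) 1).foldl pvStepB (pvF0, 0)).2) := by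
        simp [pvStepB]
      rw [hstep]
      set S := (PySem.List.pyRange 0 (↑m : Int) 1).foldl pvStepB (pvF0, 0) with hS
      have hval : pvInnerA (↑m) S.1 1 = S.1.set m (PySem.Int.bxor 1 S.2) := by
        cases m with
        | zero =>
            have hS0 : S = (pvF0, 0) := by
              rw [hS, Nat.cast_zero, PySem.List.pyRange_one_eq_nil (le_refl 0)]
              rfl
            rw [Nat.cast_zero, pv_closed_zero S.1 1 hlen, hS0]
            decide
        | succ k =>
            rw [pv_closed_succ k S.1 1 hlen (by omega), ← hprevget k rfl]
            rcases hprev01 with h0 | h0 <;> rw [h0]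
            · rw [show PySem.Int.band (PySem.Int.bxor (pvG 1) 0) 255 = PySem.Int.bxor 1 0 from by decide]
            · rw [show PySem.Int.band (PySem.Int.bxor (pvG 1) 1) 255 = PySem.Int.bxor 1 1 from by decide]
      rw [hval]
      refine ⟨rfl, by simp [hlen], ?_, ?_⟩
      · rcases hprev01 with h0 | h0 <;> rw [h0]
        · right; show PySem.Int.bxor 1 0 = 1; decide
        · left; show PySem.Int.bxor 1 1 = 0; decide
      · intro k hk
        have hkm : k = m := by omega
        subst hkm
        simp [hlen, hm21']

theorem pv_nonpos (len : Int) (h : len ≤ 0) : reverse_flag len = reverse_flag_alt len := by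
  unfold reverse_flag reverse_flag_alt
  rw [PySem.List.pyRange_one_eq_nil h]
  rfl

-- ===== VERDICT (by name: the statement is the Claim_ definition above) =====
theorem reverse_flag_spec : Claim_equal_reverse_flag := by
  intro len hdom hpre
  unfold Spec_reverse_flag
  by_cases h : len ≤ 0
  · exact pv_nonpos len h
  · have hn : len = ((len.toNat : Nat) : Int) := by omega
    have hmain := (pv_main len.toNat (by unfold Pre_reverse_flag at hpre; omega)).1
    rw [hn]
    unfold reverse_flag reverse_flag_alt
    exact hmain
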